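-- pv_equiv track=rewrite | github.com/fredderks/Advent_of_Code | AoC2020/Day 8/Day 8.py | decorrupt
-- ===== SOURCE A (Python) =====
-- def decorrupt(input_list, start_index):
--     instruction_list = [[op, arg] for op, arg in input_list]
--     for index, instruction in enumerate(instruction_list[start_index:], start=start_index):
--         if instruction[0] == "nop":
--             instruction[0] = "jmp"
--             instruction_list[index] = instruction
--             break
--         elif instruction[0] == "jmp":
--             instruction[0] = "nop"
--             instruction_list[index] = instruction
--             break
--     return instruction_list
-- ===== SOURCE B (Python) =====
-- def _fix(rows):
--     if not rows:
--         return []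
--     op, arg = rows[0]
--     if op == "nop":
--         return [["jmp", arg]] + [[o, a] for o, a in rows[1:]]
--     if op == "jmp":
--         return [["nop", arg]] + [[o, a] for o, a in rows[1:]]
--     return [[op, arg]] + _fix(rows[1:])
--
--
-- def decorrupt(input_list, start_index):
--     return ([[op, arg] for op, arg in input_list[:start_index]]
--             + _fix(input_list[start_index:]))
-- ===== Notes on version B (the rewrite author's own statement) =====
-- stated objective: alternative
-- what changed: B splits the list by Python slicing into an untouched prefix and the suffix from start_index, swaps the first nop/jmp in the suffix by structural recursion, and concatenates the copied pieces, instead of A's copy-whole-list-then-enumerate-with-break mutation loop.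
-- intended difference: When start_index < -len(input_list) and the first nop/jmp row is at position p with start_index + p >= -len, A's aliasing writes the swapped row both at p and at the stale index len + start_index + p, while B swaps only position p, the intended single-swap result. — e.g. on decorrupt([["acc", "1"], ["nop", "2"]], -3): A returns [["jmp", "2"], ["jmp", "2"]], B returns [["acc", "1"], ["jmp", "2"]]
import Mathlib
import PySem

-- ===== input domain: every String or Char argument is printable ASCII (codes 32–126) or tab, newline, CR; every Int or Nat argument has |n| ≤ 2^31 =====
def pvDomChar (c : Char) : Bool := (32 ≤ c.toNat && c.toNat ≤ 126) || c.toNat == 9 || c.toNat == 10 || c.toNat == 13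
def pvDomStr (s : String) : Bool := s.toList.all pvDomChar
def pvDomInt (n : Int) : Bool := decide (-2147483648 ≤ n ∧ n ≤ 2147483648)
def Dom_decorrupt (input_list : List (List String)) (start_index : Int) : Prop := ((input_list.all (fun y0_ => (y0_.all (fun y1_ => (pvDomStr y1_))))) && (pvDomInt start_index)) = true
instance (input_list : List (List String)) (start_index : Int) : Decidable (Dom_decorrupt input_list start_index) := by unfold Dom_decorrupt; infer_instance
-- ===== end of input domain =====

-- B splits the list by slicing into an untouched prefix and the suffix from start_index, swaps the
-- first nop/jmp in the suffix by structural recursion and concatenates, instead of A's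
-- copy-whole-list-then-enumerate-with-break mutation loop (alternative decomposition, same cost).

-- ===== PORT A =====
-- the '[op, arg] for op, arg in input_list' copy; identity on length-2 rows (Pre_ guarantees that shape)
def pvCopyRow (l : List String) : List String :=
  match l with
  | [op, arg] => [op, arg]
  | _ => l

-- the for/enumerate loop with break; 'instruction[0] = …' mutates the row aliased at absolute
-- position pos inside instruction_list, then 'instruction_list[index] = instruction' writes the
-- same row at Python index idx (pySetD: total form, exact where Python does not raise — see Pre_)
def pvLoopA (lst : List (List String)) (idx : Int) (pos : Nat) :
    List (List String) → List (List String)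
  | [] => lst
  | ins :: rest =>
    if PySem.List.pyGet? ins 0 == some "nop" then
      let ins' := PySem.List.pySetD ins 0 "jmp"
      PySem.List.pySetD (lst.set pos ins') idx ins'
    else if PySem.List.pyGet? ins 0 == some "jmp" then
      let ins' := PySem.List.pySetD ins 0 "nop"
      PySem.List.pySetD (lst.set pos ins') idx ins'
    else pvLoopA lst (idx + 1) (pos + 1) rest

def decorrupt (input_list : List (List String)) (start_index : Int) : List (List String) :=
  let instruction_list := input_list.map pvCopyRow
  pvLoopA instruction_list start_index
    (PySem.List.clampIdx instruction_list.length start_index)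
    (PySem.List.slice instruction_list (some start_index) none)

-- ===== PORT B =====
-- '[[o, a] for o, a in rows]' (B's copying comprehensions); identity on pair rows
def pvPairB (l : List String) : List String :=
  match l with
  | [o, a] => [o, a]
  | _ => l

-- _fix: structural recursion swapping the first nop/jmp, copying everything else
-- ('op, arg = rows[0]' unpacking raises on non-pair rows in Python; Pre_ excludes those,
-- the total port keeps such a row unchanged)
def pvFix : List (List String) → List (List String)
  | [] => []
  | row :: rest =>
    match row with
    | [op, arg] =>
      if op == "nop" then ["jmp", arg] :: rest.map pvPairB
      else if op == "jmp" then ["nop", arg] :: rest.map pvPairB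
      else [op, arg] :: pvFix rest
    | _ => row :: pvFix rest

def decorrupt_alt (input_list : List (List String)) (start_index : Int) : List (List String) :=
  (PySem.List.slice input_list none (some start_index)).map pvPairB ++
    pvFix (PySem.List.slice input_list (some start_index) none)

-- ===== PRECONDITION & SPEC =====
-- "this row's op is nop or jmp", as a plain shape condition on the input row
def pvRowOp (l : List String) : Bool := decide (l.head? ∈ [some "nop", some "jmp"])

-- Pre_ excludes exactly the inputs where Python A raises: a row that is not a [op, arg] pair
-- (ValueError in the unpacking comprehension), or start_index < -len with the first nop/jmp row
-- found at a position p whose enumerate index start_index + p is still < -len (IndexError on assignment).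
def Pre_decorrupt (input_list : List (List String)) (start_index : Int) : Prop :=
  (∀ l ∈ input_list, l.length = 2) ∧
  (-(input_list.length : Int) ≤ start_index ∨
    ((input_list.findIdx? pvRowOp).all
      (fun p => decide (-(input_list.length : Int) ≤ start_index + p))) = true)
instance (input_list : List (List String)) (start_index : Int) : Decidable (Pre_decorrupt input_list start_index) := by unfold Pre_decorrupt; infer_instance

def pvWitness_decorrupt : List (List String) × Int := ([["nop", "1"]], 0)

-- When start_index < -len and the first nop/jmp row sits at position p with -len ≤ start_index + p,
-- A returns a list where the swapped row appears BOTH at p (in-place mutation of the aliased row)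
-- and at the unrelated position len + start_index + p (the stale enumerate index), while B returns
-- the list with only position p swapped, which is the intended single-swap result.
def D_decorrupt (input_list : List (List String)) (start_index : Int) : Prop :=
  start_index < -(input_list.length : Int) ∧
  ((input_list.findIdx? pvRowOp).any
    (fun p => decide (-(input_list.length : Int) ≤ start_index + p))) = true
instance (input_list : List (List String)) (start_index : Int) : Decidable (D_decorrupt input_list start_index) := by unfold D_decorrupt; infer_instance

def Spec_decorrupt (input_list : List (List String)) (start_index : Int) (out : List (List String)) : Prop :=
  ¬ D_decorrupt input_list start_index → out = decorrupt_alt input_list start_index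
instance (input_list : List (List String)) (start_index : Int) (out : List (List String)) : Decidable (Spec_decorrupt input_list start_index out) := by unfold Spec_decorrupt; infer_instance

def pvDiffWitness_decorrupt : List (List String) × Int := ([["acc", "1"], ["nop", "2"]], -3)
def pvDiffWitnessOut_decorrupt : (List (List String)) × (List (List String)) :=
  ([["jmp", "2"], ["jmp", "2"]], [["acc", "1"], ["jmp", "2"]])

-- ===== CLAIM (what is proved, stated in full; the proofs are below) =====
def Claim_unchanged_decorrupt : Prop := ∀ (input_list : List (List String)) (start_index : Int), Dom_decorrupt input_list start_index → Pre_decorrupt input_list start_index → Spec_decorrupt input_list start_index (decorrupt input_list start_index)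
def Claim_changed_decorrupt : Prop := Dom_decorrupt (pvDiffWitness_decorrupt.1) (pvDiffWitness_decorrupt.2) ∧ Pre_decorrupt (pvDiffWitness_decorrupt.1) (pvDiffWitness_decorrupt.2) ∧ D_decorrupt (pvDiffWitness_decorrupt.1) (pvDiffWitness_decorrupt.2) ∧ decorrupt (pvDiffWitness_decorrupt.1) (pvDiffWitness_decorrupt.2) = pvDiffWitnessOut_decorrupt.1 ∧ decorrupt_alt (pvDiffWitness_decorrupt.1) (pvDiffWitness_decorrupt.2) = pvDiffWitnessOut_decorrupt.2 ∧ pvDiffWitnessOut_decorrupt.1 ≠ pvDiffWitnessOut_decorrupt.2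
def Claim_exact_decorrupt : Prop := ∀ (input_list : List (List String)) (start_index : Int), Dom_decorrupt input_list start_index → Pre_decorrupt input_list start_index → D_decorrupt input_list start_index → decorrupt input_list start_index ≠ decorrupt_alt input_list start_index

-- ===== LEMMAS AND PROOFS =====

def pvIsSwap (l : List String) : Bool :=
  PySem.List.pyGet? l 0 == some "nop" || PySem.List.pyGet? l 0 == some "jmp"

lemma pvRowOp_eq_pvIsSwap : pvRowOp = pvIsSwap := by
  funext l
  unfold pvRowOp pvIsSwap
  cases l with
  | nil => rfl
  | cons a t =>
    have : PySem.List.pyGet? (a :: t) 0 = some a := by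
      rw [show ((0 : Int)) = ((0 : Nat) : Int) from rfl, PySem.List.pyGet?_natCast]; rfl
    rw [this]
    by_cases h1 : a = "nop" <;> by_cases h2 : a = "jmp" <;> simp [h1, h2]

lemma pvCopyRow_id (l : List String) : pvCopyRow l = l := by
  rcases l with _ | ⟨a, _ | ⟨b, _ | ⟨c, t⟩⟩⟩ <;> rfl

lemma map_pvCopyRow (xs : List (List String)) : xs.map pvCopyRow = xs := by
  simp [show pvCopyRow = id from funext pvCopyRow_id]

lemma pvPairB_id (l : List String) : pvPairB l = l := by
  rcases l with _ | ⟨a, _ | ⟨b, _ | ⟨c, t⟩⟩⟩ <;> rfl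

lemma map_pvPairB (xs : List (List String)) : xs.map pvPairB = xs := by
  simp [show pvPairB = id from funext pvPairB_id]

-- the row A writes at the found position: mutation of ins at slot 0
def pvSwapEl (l : List String) : List String :=
  if PySem.List.pyGet? l 0 == some "nop" then PySem.List.pySetD l 0 "jmp"
  else PySem.List.pySetD l 0 "nop"

lemma pvLoopA_eq (rest : List (List String)) : ∀ (lst : List (List String)) (idx : Int) (pos : Nat),
    pvLoopA lst idx pos rest =
      match rest.findIdx? pvIsSwap with
      | none => lst
      | some j => PySem.List.pySetD (lst.set (pos + j) (pvSwapEl (rest.getD j [])))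
          (idx + j) (pvSwapEl (rest.getD j [])) := by
  induction rest with
  | nil => intro lst idx pos; simp [pvLoopA]
  | cons ins rs ih =>
    intro lst idx pos
    rw [List.findIdx?_cons]
    by_cases h1 : PySem.List.pyGet? ins 0 == some "nop"
    · have hsw : pvIsSwap ins = true := by simp [pvIsSwap, h1]
      simp only [pvLoopA, h1, if_true, hsw]
      simp [pvSwapEl, h1]
    · by_cases h2 : PySem.List.pyGet? ins 0 == some "jmp"
      · have hsw : pvIsSwap ins = true := by
          simp only [pvIsSwap]; rw [Bool.or_eq_true]; right; exact h2
        simp only [pvLoopA, h1, h2, if_true, hsw]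
        simp [pvSwapEl, h1]
      · have hsw : pvIsSwap ins = false := by
          simp only [pvIsSwap]; rw [Bool.or_eq_false_iff]
          exact ⟨by simpa using h1, by simpa using h2⟩
        simp only [pvLoopA, h1, h2, hsw]
        rw [ih lst (idx + 1) (pos + 1)]
        cases hfi : rs.findIdx? pvIsSwap with
        | none => simp
        | some j =>
          simp only [Option.map_some]
          have h3 : pos + 1 + j = pos + (j + 1) := by omega
          have h4 : idx + 1 + (j : Int) = idx + ((j : Nat) + 1 : Nat) := by push_cast; ring
          rw [h3, h4]
          rfl

lemma decorrupt_eq (xs : List (List String)) (si : Int) :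
    decorrupt xs si =
      match (xs.drop (PySem.List.clampIdx xs.length si)).findIdx? pvIsSwap with
      | none => xs
      | some j =>
          PySem.List.pySetD
            (xs.set (PySem.List.clampIdx xs.length si + j)
              (pvSwapEl ((xs.drop (PySem.List.clampIdx xs.length si)).getD j [])))
            (si + j)
            (pvSwapEl ((xs.drop (PySem.List.clampIdx xs.length si)).getD j [])) := by
  unfold decorrupt
  simp only [map_pvCopyRow, PySem.List.slice_some_none]
  exact pvLoopA_eq _ xs si _

-- the swapped row pvFix produces at a matched pair row is exactly A's mutated row
lemma pvSwapEl_pair (op arg : String) (h : pvIsSwap [op, arg] = true) :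
    (if op == "nop" then ["jmp", arg] else ["nop", arg]) = pvSwapEl [op, arg] ∧
      pvIsSwap (pvSwapEl [op, arg]) = true := by
  have hget : PySem.List.pyGet? [op, arg] 0 = some op := by
    rw [show ((0 : Int)) = ((0 : Nat) : Int) from rfl, PySem.List.pyGet?_natCast]; rfl
  by_cases h1 : op = "nop"
  · subst h1; exact ⟨rfl, rfl⟩
  · by_cases h2 : op = "jmp"
    · subst h2; exact ⟨rfl, rfl⟩
    · exfalso
      unfold pvIsSwap at h
      rw [hget] at h
      simp [h1, h2] at h

-- pvFix, characterised: swap the first nop/jmp row (if any) in place, keep the rest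
lemma pvFix_eq (rows : List (List String)) (hlen : ∀ l ∈ rows, l.length = 2) :
    pvFix rows =
      match rows.findIdx? pvIsSwap with
      | none => rows
      | some j => rows.set j (pvSwapEl (rows.getD j [])) := by
  induction rows with
  | nil => rfl
  | cons row rest ih =>
    have hpair : ∃ op arg, row = [op, arg] := by
      have h2 := hlen row (List.mem_cons_self)
      rcases hx : row with _ | ⟨a, _ | ⟨b, _ | ⟨c, t⟩⟩⟩ <;> simp_all
    rcases hpair with ⟨op, arg, rfl⟩
    rw [List.findIdx?_cons]
    have hget : PySem.List.pyGet? [op, arg] 0 = some op := by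
      rw [show ((0 : Int)) = ((0 : Nat) : Int) from rfl, PySem.List.pyGet?_natCast]; rfl
    by_cases h1 : op = "nop"
    · subst h1
      have hsw : pvIsSwap ["nop", arg] = true := rfl
      simp only [pvFix, hsw, if_true]
      rw [map_pvPairB]
      rfl
    · by_cases h2 : op = "jmp"
      · subst h2
        have hsw : pvIsSwap ["jmp", arg] = true := rfl
        simp only [pvFix, hsw, if_true, show (("jmp" : String) == "nop") = false from rfl,
          Bool.false_eq_true, if_false]
        rw [map_pvPairB]
        rfl
      · have hsw : pvIsSwap [op, arg] = false := by
          unfold pvIsSwap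
          rw [hget]
          simp [h1, h2]
        have hbeq1 : (op == "nop") = false := by simp [h1]
        have hbeq2 : (op == "jmp") = false := by simp [h2]
        simp only [pvFix, hbeq1, hbeq2, Bool.false_eq_true, if_false, hsw]
        rw [ih (fun l hl => hlen l (List.mem_cons_of_mem _ hl))]
        cases hfi : rest.findIdx? pvIsSwap with
        | none => simp
        | some j => simp

-- xs[:b] = xs.take (clampIdx xs.length b), for every Int b
lemma slice_to_clamp (xs : List (List String)) (b : Int) :
    PySem.List.slice xs none (some b) = xs.take (PySem.List.clampIdx xs.length b) := by
  by_cases hb : 0 ≤ b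
  · rw [PySem.List.slice_to xs hb]
    have h1 : PySem.List.clampIdx xs.length b = min b.toNat xs.length := by
      rw [show b = ((b.toNat : Nat) : Int) by omega, PySem.List.clampIdx_natCast]
      omega
    rw [h1]
    rcases Nat.le_total b.toNat xs.length with h | h
    · rw [Nat.min_eq_left h]
    · rw [Nat.min_eq_right h, List.take_of_length_le h, List.take_of_length_le (by omega)]
  · have hk : 0 < (-b).toNat := by omega
    rw [show b = -(((-b).toNat : Nat) : Int) by omega,
      PySem.List.slice_to_neg_natCast xs _ hk, PySem.List.clampIdx_neg_natCast _ _ hk]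

-- prefix ++ set-in-suffix = set in the whole list
lemma take_append_set (xs : List (List String)) (k j : Nat) (v : List String)
    (hk : k ≤ xs.length) :
    xs.take k ++ (xs.drop k).set j v = xs.set (k + j) v := by
  conv_rhs => rw [← List.take_append_drop k xs]
  rw [List.set_append]
  have hlt : ¬ (k + j < (xs.take k).length) := by
    simp [List.length_take, Nat.min_eq_left hk]
  rw [if_neg hlt]
  congr 2
  simp [List.length_take, Nat.min_eq_left hk]

-- B's result, characterised the same way as A's
lemma decorrupt_alt_eq (xs : List (List String)) (si : Int)
    (hlen : ∀ l ∈ xs, l.length = 2) :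
    decorrupt_alt xs si =
      match (xs.drop (PySem.List.clampIdx xs.length si)).findIdx? pvIsSwap with
      | none => xs
      | some j =>
          xs.set (PySem.List.clampIdx xs.length si + j)
            (pvSwapEl ((xs.drop (PySem.List.clampIdx xs.length si)).getD j [])) := by
  unfold decorrupt_alt
  set k := PySem.List.clampIdx xs.length si with hk
  have hkle : k ≤ xs.length := PySem.List.clampIdx_le _ _
  rw [slice_to_clamp, PySem.List.slice_some_none, map_pvPairB, ← hk]
  rw [pvFix_eq _ (fun l hl => hlen l (List.mem_of_mem_drop hl))]
  cases hfi : (xs.drop k).findIdx? pvIsSwap with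
  | none => simp [List.take_append_drop]
  | some j => exact take_append_set xs k j _ hkle

-- the found row at relative position j below k: its absolute position and pvIsSwap of the swap
lemma pvRow_lemma (xs : List (List String)) (k j : Nat) (hlen : ∀ l ∈ xs, l.length = 2)
    (hfi : (xs.drop k).findIdx? pvIsSwap = some j) :
    k + j < xs.length ∧ pvIsSwap (pvSwapEl ((xs.drop k).getD j [])) = true := by
  obtain ⟨hj, hsw, -⟩ := List.findIdx?_eq_some_iff_getElem.mp hfi
  have hkj : k + j < xs.length := by
    simp only [List.length_drop] at hj; omega
  have hgd : (xs.drop k)[j]'hj = xs[k + j]'hkj := List.getElem_drop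
  have hget : (xs.drop k).getD j [] = xs[k + j]'hkj := by
    rw [List.getD_eq_getElem _ _ hj, hgd]
  have hpair : ∃ op arg, xs[k + j]'hkj = [op, arg] := by
    have h2 := hlen (xs[k + j]'hkj) (List.getElem_mem hkj)
    rcases hx : xs[k + j]'hkj with _ | ⟨a, _ | ⟨b, _ | ⟨c, t⟩⟩⟩ <;> simp_all
  rcases hpair with ⟨op, arg, hpair⟩
  have hswp : pvIsSwap [op, arg] = true := by
    rw [hgd, hpair] at hsw; exact hsw
  obtain ⟨-, he2⟩ := pvSwapEl_pair op arg hswp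
  refine ⟨hkj, ?_⟩
  rw [hget, hpair, he2]

-- python negative-index assignment: -len ≤ i < 0 writes at len + i
lemma pySetD_neg (xs : List (List String)) (i : Int) (v : List String)
    (h1 : -(xs.length : Int) ≤ i) (h2 : i < 0) :
    PySem.List.pySetD xs i v = xs.set ((xs.length : Int) + i).toNat v := by
  unfold PySem.List.pySetD PySem.List.pySet? PySem.List.pyIdx?
  rw [if_neg (by omega), if_pos h1]
  simp only [Option.map_some, Option.getD_some]
  congr 1
  omega

-- ===== VERDICT (by name: the statement is the Claim_ definition above) =====
theorem decorrupt_spec : Claim_unchanged_decorrupt := by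
  intro xs si _ hpre hnd
  obtain ⟨hlen, hpre2⟩ := hpre
  unfold D_decorrupt at hnd
  rw [pvRowOp_eq_pvIsSwap] at hpre2 hnd
  show decorrupt xs si = decorrupt_alt xs si
  rw [decorrupt_eq, decorrupt_alt_eq xs si hlen]
  set k := PySem.List.clampIdx xs.length si with hk
  cases hfi : (xs.drop k).findIdx? pvIsSwap with
  | none => rfl
  | some j =>
    obtain ⟨hkj, -⟩ := pvRow_lemma xs k j hlen hfi
    simp only
    by_cases hge : 0 ≤ si
    · -- nonnegative start: clampIdx = min si len, and since drop k has a member, k = si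
      have hkval : (k : Int) = si := by
        rw [hk]
        unfold PySem.List.clampIdx
        rw [if_neg (by omega)]
        have : si ≤ (xs.length : Int) := by
          by_contra h
          have : xs.length ≤ k := by
            rw [hk]; unfold PySem.List.clampIdx
            rw [if_neg (by omega)]; omega
          rw [List.drop_eq_nil_of_le this] at hfi
          simp at hfi
        omega
      rw [PySem.List.pySetD_of_nonneg _ _ (by omega)]
      have : (si + j).toNat = k + j := by omega
      rw [this, List.set_set]
    · by_cases hge2 : -(xs.length : Int) ≤ si
      · -- negative start within range: k = len + si
        have hkval : (k : Int) = (xs.length : Int) + si := by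
          rw [hk]; unfold PySem.List.clampIdx
          rw [if_pos (by omega), if_neg (by omega)]; omega
        rw [pySetD_neg _ _ _ (by simp only [List.length_set]; omega) (by omega)]
        simp only [List.length_set]
        have : ((xs.length : Int) + (si + j)).toNat = k + j := by omega
        rw [this, List.set_set]
      · -- start below -len: Pre_ and ¬D_ force "no nop/jmp row at all", contradicting the find
        exfalso
        have hk0 : k = 0 := by
          rw [hk]; unfold PySem.List.clampIdx
          rw [if_pos (by omega), if_pos (by omega)]
        rw [hk0, List.drop_zero] at hfi
        rcases hpre2 with h | h
        · omega
        · rw [hfi] at h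
          simp at h
          apply hnd
          refine ⟨by omega, ?_⟩
          rw [hfi]
          simpa using h
theorem decorrupt_changed : Claim_changed_decorrupt := by unfold Claim_changed_decorrupt; decide
theorem decorrupt_tight : Claim_exact_decorrupt := by
  intro xs si _ hpre hd heq
  obtain ⟨hlen, -⟩ := hpre
  obtain ⟨hsi, hany⟩ := hd
  rw [pvRowOp_eq_pvIsSwap] at hany
  obtain ⟨p, hfi0, hvalid⟩ : ∃ p, xs.findIdx? pvIsSwap = some p ∧
      -(xs.length : Int) ≤ si + p := by
    cases hfi : xs.findIdx? pvIsSwap with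
    | none => rw [hfi] at hany; simp at hany
    | some p => rw [hfi] at hany; simp at hany; exact ⟨p, rfl, hany⟩
  have hclamp : PySem.List.clampIdx xs.length si = 0 := by
    unfold PySem.List.clampIdx
    rw [if_pos (by omega), if_pos (by omega)]
  have hfi : (xs.drop 0).findIdx? pvIsSwap = some p := by
    rw [List.drop_zero]; exact hfi0
  obtain ⟨hp, hrowsw⟩ := pvRow_lemma xs 0 p hlen hfi
  simp only [Nat.zero_add, List.drop_zero] at hp hrowsw
  obtain ⟨hplt, hpsw, hfirst⟩ := List.findIdx?_eq_some_iff_getElem.mp hfi0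
  rw [decorrupt_eq, decorrupt_alt_eq xs si hlen] at heq
  simp only [hclamp, List.drop_zero, hfi0, Nat.zero_add] at heq
  set E := pvSwapEl (xs.getD p []) with hE
  set q : Nat := ((xs.length : Int) + (si + p)).toNat with hq
  have hqp : q < p := by omega
  have hqn : q < xs.length := by omega
  rw [pySetD_neg _ _ _ (by simp only [List.length_set]; omega) (by omega)] at heq
  simp only [List.length_set] at heq
  rw [← hq] at heq
  have h1 : (((xs.set p E).set q E)[q]'(by simpa using hqn)) = E :=
    List.getElem_set_self _
  have h2 : ((xs.set p E)[q]'(by simpa using hqn)) = xs[q]'hqn :=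
    List.getElem_set_ne (by omega) _
  rw [List.getElem_of_eq heq (by simpa using hqn), h2] at h1
  have hqsw : pvIsSwap (xs[q]'hqn) = false := by
    simpa using hfirst q hqp
  rw [h1] at hqsw
  rw [hqsw] at hrowsw
  exact Bool.false_ne_true hrowsw
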